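-- pv_equiv track=rewrite | github.com/rjsnh1522/geeks-4-geeks-python | queues/print_n_number_having_d_digits.py | solve
-- ===== SOURCE A (Python) =====
-- from copy import copy
--
-- def solve(A):
--     digits = [1, 2, 3]
--     queue = copy(digits)
--     ans = []
--     for i in range(A):
--         ele = queue.pop(0)
--         ans.append(ele)
--         for k in digits:
--             queue.append(int(str(ele)+str(k)))
--     return ans
-- ===== SOURCE B (Python) =====
-- def solve(A):
--     # Each answer element is computed independently: the i-th number (1-based)
--     # in the sequence is i written in bijective base-3 with digit set {1,2,3}.
--     def val(i):
--         v, p, n = 0, 1, i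
--         while n:
--             v += ((n - 1) % 3 + 1) * p
--             p *= 10
--             n = (n - 1) // 3
--         return v
--     return [val(i) for i in range(1, A + 1)]
-- ===== Notes on version B (the rewrite author's own statement) =====
-- stated objective: alternative
-- what changed: Replaced the BFS queue (which builds each child by string concatenation plus reparsing and pops from the front of an ever-growing list) by a closed-form per-index computation: the i-th element is i written in bijective base-three over the digit alphabet one/two/three, computed arithmetically with no queue and no strings.
import Mathlib
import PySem

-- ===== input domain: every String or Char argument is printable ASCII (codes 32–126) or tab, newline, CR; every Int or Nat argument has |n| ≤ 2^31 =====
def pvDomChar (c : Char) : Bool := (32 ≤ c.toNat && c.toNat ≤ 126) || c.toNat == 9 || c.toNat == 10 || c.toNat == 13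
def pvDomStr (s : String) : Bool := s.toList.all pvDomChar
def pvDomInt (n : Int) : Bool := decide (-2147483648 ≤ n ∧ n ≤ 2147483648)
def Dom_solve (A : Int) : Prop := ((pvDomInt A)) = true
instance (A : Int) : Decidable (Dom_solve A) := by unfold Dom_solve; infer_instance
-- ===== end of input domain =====

-- B replaces A's BFS queue (string-concat children, front pops) by a per-index closed form:
-- element i is i written in bijective base-three over the digit alphabet one/two/three.


-- ===== PORT A =====
-- int(str(ele) + str(k)): PySem.Int.ofChars? over the concatenated toChars lists
-- (exact: ofStr?_ofList / toList_toStr bridge String ↔ List Char); int() never raises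
-- here since both pieces are decimal digits, so the `none` branch is unreachable.
def childA (ele k : Int) : Int :=
  (PySem.Int.ofChars? (PySem.Int.toChars ele ++ PySem.Int.toChars k)).getD 0

-- one iteration of A's `for i in range(A)` body; queue.pop(0) raising on an empty
-- queue is unreachable (the queue never shrinks below 3 elements), st kept unchanged there
def bodyA (st : List Int × List Int) (_i : Int) : List Int × List Int :=
  match PySem.List.pop? st.1 0 with
  | none => st
  | some (ele, q) =>
    let ans := st.2 ++ [ele]
    let q := ([1, 2, 3] : List Int).foldl (fun q k => q ++ [childA ele k]) q
    (q, ans)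

def solve (A : Int) : List Int :=
  ((PySem.List.pyRange 0 A 1).foldl bodyA (([1, 2, 3] : List Int), ([] : List Int))).2

-- ===== PORT B =====
-- the `while n:` loop of Source B's val(i); first argument is fuel (≥ n, so the
-- fuel-exhausted branch is unreachable), then (n, v, p) exactly as in Source B
def valAuxB : Nat → Nat → Int → Int → Int
  | _, 0, v, _ => v
  | 0, _ + 1, v, _ => v
  | fu + 1, n + 1, v, p => valAuxB fu (n / 3) (v + (((n % 3 : Nat) : Int) + 1) * p) (p * 10)

def solve_alt (A : Int) : List Int :=
  (PySem.List.pyRange 1 (A + 1) 1).map (fun i => valAuxB i.toNat i.toNat 0 1)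

-- ===== PRECONDITION & SPEC =====
def Spec_solve (A : Int) (out : List Int) : Prop := out = solve_alt A
instance (A : Int) (out : List Int) : Decidable (Spec_solve A out) := by unfold Spec_solve; infer_instance

-- ===== CLAIM (what is proved, stated in full; the proofs are below) =====
def Claim_equal_solve : Prop := ∀ (A : Int), Dom_solve A → Spec_solve A (solve A)

-- ===== LEMMAS AND PROOFS =====

-- B's value of index m (what val(m) computes)
def fval (m : Nat) : Int := valAuxB m m 0 1

lemma valAuxB_acc : ∀ (n f : Nat) (v p : Int), n ≤ f →
    valAuxB f n v p = v + p * fval n := by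
  intro n
  induction n using Nat.strong_induction_on with
  | _ n ih =>
    match n with
    | 0 => intro f v p _; cases f <;> simp [valAuxB, fval]
    | n + 1 =>
      intro f v p hf
      match f, hf with
      | f + 1, _ =>
        have hlt : n / 3 < n + 1 := Nat.lt_succ_of_le (Nat.div_le_self n 3)
        have h1 : n / 3 ≤ f := le_trans (Nat.div_le_self n 3) (by omega)
        have h2 : n / 3 ≤ n := Nat.div_le_self n 3
        show valAuxB (f+1) (n+1) v p = v + p * fval (n+1)
        have e1 : valAuxB (f+1) (n+1) v p = valAuxB f (n/3) (v + (((n % 3 : Nat) : Int) + 1) * p) (p * 10) := rfl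
        have e2 : fval (n+1) = valAuxB n (n/3) (0 + (((n % 3 : Nat) : Int) + 1) * 1) (1 * 10) := rfl
        rw [e1, ih _ hlt _ _ _ h1, e2, ih _ hlt _ _ _ h2]
        ring

lemma fval_succ (n : Nat) : fval (n + 1) = 10 * fval (n / 3) + (((n % 3 : Nat) : Int) + 1) := by
  have e2 : fval (n+1) = valAuxB n (n/3) (0 + (((n % 3 : Nat) : Int) + 1) * 1) (1 * 10) := rfl
  rw [e2, valAuxB_acc _ _ _ _ (Nat.div_le_self n 3)]
  ring

lemma fval_nonneg (n : Nat) : 0 ≤ fval n := by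
  induction n using Nat.strong_induction_on with
  | _ n ih =>
    match n with
    | 0 => simp [fval, valAuxB]
    | n + 1 =>
      rw [fval_succ]
      have := ih (n / 3) (Nat.lt_succ_of_le (Nat.div_le_self n 3))
      positivity

lemma fval_pos (n : Nat) (h : 1 ≤ n) : 1 ≤ fval n := by
  match n, h with
  | n + 1, _ =>
    rw [fval_succ]
    have := fval_nonneg (n / 3)
    have : (0:Int) ≤ ((n % 3 : Nat) : Int) := Int.natCast_nonneg _
    omega

lemma fval_child (m k : Nat) (h1 : 1 ≤ k) (h3 : k ≤ 3) :
    fval (3 * m + k) = 10 * fval m + (k : Int) := by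
  have hd : 3 * m + k = (3 * m + (k - 1)) + 1 := by omega
  rw [hd, fval_succ]
  have hq : (3 * m + (k - 1)) / 3 = m := by omega
  have hr : (3 * m + (k - 1)) % 3 = k - 1 := by omega
  rw [hq, hr]
  have : ((k - 1 : Nat) : Int) = (k : Int) - 1 := by omega
  rw [this]; ring
def step10 (a : Nat) (c : Char) : Nat := a * 10 + (c.toNat - '0'.toNat)
def rep (n : Nat) : List Char :=
  if n < 10 then [Nat.digitChar n]
  else rep (n / 10) ++ [Nat.digitChar (n % 10)]
termination_by n
decreasing_by exact Nat.div_lt_self (by omega) (by omega)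

lemma digitChar_isDigit (m : Nat) (h : m < 10) : (Nat.digitChar m).isDigit = true := by
  interval_cases m <;> decide
lemma digitChar_val (m : Nat) (h : m < 10) : (Nat.digitChar m).toNat - '0'.toNat = m := by
  interval_cases m <;> decide

lemma rep_ne_nil (n : Nat) : rep n ≠ [] := by
  rw [rep]; split <;> simp

lemma rep_digits (n : Nat) : ∀ c ∈ rep n, c.isDigit = true := by
  induction n using Nat.strong_induction_on with
  | _ n ih =>
    rw [rep]
    split
    · intro c hc; simp at hc; subst hc; exact digitChar_isDigit n (by omega)
    · intro c hc
      simp only [List.mem_append, List.mem_singleton] at hc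
      rcases hc with hc | hc
      · exact ih (n / 10) (Nat.div_lt_self (by omega) (by omega)) c hc
      · subst hc; exact digitChar_isDigit _ (Nat.mod_lt _ (by omega))

lemma rep_val (n : Nat) : (rep n).foldl step10 0 = n := by
  induction n using Nat.strong_induction_on with
  | _ n ih =>
    rw [rep]
    split
    · simp only [List.foldl_cons, List.foldl_nil, step10]
      rw [digitChar_val n (by omega)]
      simp
    · rw [List.foldl_append, ih (n / 10) (Nat.div_lt_self (by omega) (by omega))]
      simp only [List.foldl_cons, List.foldl_nil, step10]
      rw [digitChar_val _ (Nat.mod_lt _ (by omega))]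
      omega

lemma toDigitsCore_eq : ∀ (f n : Nat) (ds : List Char), 0 < f → n < 10 ^ f →
    Nat.toDigitsCore 10 f n ds = rep n ++ ds := by
  intro f
  induction f with
  | zero => omega
  | succ f ihf =>
    intro n ds _ hlt
    have estep : Nat.toDigitsCore 10 (f+1) n ds =
        if n / 10 = 0 then Nat.digitChar (n % 10) :: ds
        else Nat.toDigitsCore 10 f (n / 10) (Nat.digitChar (n % 10) :: ds) := rfl
    rw [estep]
    by_cases h0 : n / 10 = 0
    · have hn : n < 10 := by omega
      rw [if_pos h0, rep, if_pos hn, Nat.mod_eq_of_lt hn]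
      rfl
    · have hn : ¬ n < 10 := by omega
      have hf : 0 < f := by
        rcases Nat.eq_zero_or_pos f with rfl | hpos
        · norm_num at hlt; omega
        · exact hpos
      rw [if_neg h0, ihf _ _ hf (by
        rw [Nat.div_lt_iff_lt_mul (by omega : 0 < 10)]
        calc n < 10 ^ (f + 1) := hlt
          _ = 10 ^ f * 10 := pow_succ 10 f)]
      conv_rhs => rw [rep]
      rw [if_neg hn, List.append_assoc]
      rfl

lemma toChars_eq_rep (a : Int) (h : 0 ≤ a) : PySem.Int.toChars a = rep a.toNat := by
  rw [PySem.Int.toChars]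
  rw [if_neg (by omega)]
  show Nat.toDigitsCore 10 (a.toNat + 1) a.toNat [] = rep a.toNat
  rw [toDigitsCore_eq _ _ _ (by omega) ?_, List.append_nil]
  calc a.toNat < 10 ^ a.toNat := Nat.lt_pow_self (by omega)
    _ ≤ 10 ^ (a.toNat + 1) := Nat.pow_le_pow_right (by omega) (by omega)

def shape (g : List Char → Bool → Nat → Option Nat) (s : List Char) : Option Int :=
  have cs := (List.dropWhile PySem.Int.isIntSpace (List.dropWhile PySem.Int.isIntSpace s).reverse).reverse
  match cs with
  | '-' :: ds => Option.map (fun n => -n) (do let a ← (match ds with | [] => none | cs => g cs false 0); pure (a : Int))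
  | '+' :: ds => Option.map (fun n => n) (do let a ← (match ds with | [] => none | cs => g cs false 0); pure (a : Int))
  | ds => Option.map (fun n => n) (do let a ← (match ds with | [] => none | cs => g cs false 0); pure (a : Int))

theorem ex_g : ∃ g : List Char → Bool → Nat → Option Nat,
    (∀ s, PySem.Int.ofChars? s = shape g s) ∧
    (∀ b acc, g [] b acc = if b then some acc else none) ∧
    (∀ c rest b acc, g (c :: rest) b acc =
      if c.isDigit = true then g rest true (acc * 10 + (c.toNat - '0'.toNat))
      else if c = '_' ∧ b = true then
        (match rest with | d :: _ => if d.isDigit = true then g rest false acc else none | [] => none)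
      else none) := by
  refine ⟨?g, ?h1, ?h2, ?h3⟩
  case h1 => intro s; rfl
  case h2 => intro b acc; rfl
  case h3 => intro c rest b acc; rfl

lemma digit_not_special (c : Char) (h : c.isDigit = true) :
    PySem.Int.isIntSpace c = false ∧ c ≠ '-' ∧ c ≠ '+' := by
  refine ⟨?_, ?_, ?_⟩
  · by_contra hs
    simp only [Bool.not_eq_false, PySem.Int.isIntSpace, Bool.or_eq_true, decide_eq_true_eq] at hs
    rcases hs with ((((h1 | h1) | h1) | h1) | h1) | h1 <;> subst h1 <;> simp at h
  · rintro rfl; simp at h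
  · rintro rfl; simp at h

lemma dropWhile_all_false {p : Char → Bool} : ∀ (l : List Char), (∀ c ∈ l, p c = false) →
    List.dropWhile p l = l := by
  intro l h
  cases l with
  | nil => rfl
  | cons c t => rw [List.dropWhile_cons, h c (by simp)]; simp

lemma gdigits (g : List Char → Bool → Nat → Option Nat)
    (hnil : ∀ b acc, g [] b acc = if b then some acc else none)
    (hcons : ∀ c rest b acc, g (c :: rest) b acc =
      if c.isDigit = true then g rest true (acc * 10 + (c.toNat - '0'.toNat))
      else if c = '_' ∧ b = true then
        (match rest with | d :: _ => if d.isDigit = true then g rest false acc else none | [] => none)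
      else none) :
    ∀ (ds : List Char) (b : Bool) (acc : Nat), (∀ c ∈ ds, c.isDigit = true) →
      (b = true ∨ ds ≠ []) → g ds b acc = some (ds.foldl step10 acc) := by
  intro ds
  induction ds with
  | nil =>
    intro b acc _ hb
    rcases hb with rfl | hb
    · simp [hnil]
    · simp at hb
  | cons c t ih =>
    intro b acc hall _
    rw [hcons, if_pos (hall c (by simp))]
    rw [ih true _ (fun x hx => hall x (by simp [hx])) (Or.inl rfl)]
    rfl

lemma digit_cases (c : Char) (h : c.isDigit = true) :
    c = '0' ∨ c = '1' ∨ c = '2' ∨ c = '3' ∨ c = '4' ∨ c = '5' ∨ c = '6' ∨ c = '7' ∨ c = '8' ∨ c = '9' := by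
  have hb1 : 48 ≤ c.toNat := by
    simp only [Char.isDigit, Bool.and_eq_true, decide_eq_true_eq] at h
    exact h.1
  have hb2 : c.toNat ≤ 57 := by
    simp only [Char.isDigit, Bool.and_eq_true, decide_eq_true_eq] at h
    exact h.2
  have hinj : ∀ (d : Char), c.toNat = d.toNat → c = d := by
    intro d hd
    apply Char.ext
    exact UInt32.toNat_inj.mp hd
  interval_cases hn : c.toNat
  · exact Or.inl (hinj '0' (by decide))
  · exact Or.inr (Or.inl (hinj '1' (by decide)))
  · exact Or.inr (Or.inr (Or.inl (hinj '2' (by decide))))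
  · exact Or.inr (Or.inr (Or.inr (Or.inl (hinj '3' (by decide)))))
  · exact Or.inr (Or.inr (Or.inr (Or.inr (Or.inl (hinj '4' (by decide))))))
  · exact Or.inr (Or.inr (Or.inr (Or.inr (Or.inr (Or.inl (hinj '5' (by decide)))))))
  · exact Or.inr (Or.inr (Or.inr (Or.inr (Or.inr (Or.inr (Or.inl (hinj '6' (by decide))))))))
  · exact Or.inr (Or.inr (Or.inr (Or.inr (Or.inr (Or.inr (Or.inr (Or.inl (hinj '7' (by decide)))))))))
  · exact Or.inr (Or.inr (Or.inr (Or.inr (Or.inr (Or.inr (Or.inr (Or.inr (Or.inl (hinj '8' (by decide))))))))))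
  · exact Or.inr (Or.inr (Or.inr (Or.inr (Or.inr (Or.inr (Or.inr (Or.inr (Or.inr ((hinj '9' (by decide)))))))))))

lemma ofChars?_digits (ds : List Char) (hne : ds ≠ []) (hall : ∀ c ∈ ds, c.isDigit = true) :
    PySem.Int.ofChars? ds = some ((ds.foldl step10 0 : Nat) : Int) := by
  obtain ⟨g, hs, hnil, hcons⟩ := ex_g
  rw [hs]
  have hnsp : ∀ c ∈ ds, PySem.Int.isIntSpace c = false :=
    fun c hc => (digit_not_special c (hall c hc)).1
  have hd1 : List.dropWhile PySem.Int.isIntSpace ds = ds := dropWhile_all_false ds hnsp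
  have hd2 : List.dropWhile PySem.Int.isIntSpace ds.reverse = ds.reverse :=
    dropWhile_all_false _ (fun c hc => hnsp c (List.mem_reverse.mp hc))
  unfold shape
  rw [hd1, hd2, List.reverse_reverse]
  cases ds with
  | nil => exact absurd rfl hne
  | cons c t =>
    have hc := hall c (by simp)
    have hne1 : c ≠ '-' := (digit_not_special c hc).2.1
    have hne2 : c ≠ '+' := (digit_not_special c hc).2.2
    have hg := gdigits g hnil hcons (c :: t) false 0 hall (Or.inr (by simp))
    have hcases : c = '0' ∨ c = '1' ∨ c = '2' ∨ c = '3' ∨ c = '4' ∨ c = '5' ∨ c = '6' ∨ c = '7' ∨ c = '8' ∨ c = '9' := digit_cases c hc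
    have hg2 : (match c :: t with | [] => (none : Option Nat) | cs => g cs false 0) =
        some (List.foldl step10 0 (c :: t)) := hg
    rcases hcases with rfl | rfl | rfl | rfl | rfl | rfl | rfl | rfl | rfl | rfl <;>
      (conv_lhs => whnf) <;> rw [hg2] <;> rfl

lemma ofChars_child (a k : Int) (ha : 1 ≤ a) (hk : k = 1 ∨ k = 2 ∨ k = 3) :
    PySem.Int.ofChars? (PySem.Int.toChars a ++ PySem.Int.toChars k) = some (10 * a + k) := by
  have hta : PySem.Int.toChars a = rep a.toNat := toChars_eq_rep a (by omega)
  have hck : ∃ ck : Char, PySem.Int.toChars k = [ck] ∧ ck.isDigit = true ∧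
      (ck.toNat - '0'.toNat : Nat) = k.toNat := by
    rcases hk with rfl | rfl | rfl
    · exact ⟨'1', rfl, by decide, by decide⟩
    · exact ⟨'2', rfl, by decide, by decide⟩
    · exact ⟨'3', rfl, by decide, by decide⟩
  obtain ⟨ck, hk1, hk2, hk3⟩ := hck
  rw [hta, hk1]
  rw [ofChars?_digits _ (by simp [rep_ne_nil]) ?hall]
  case hall =>
    intro c hcmem
    rcases List.mem_append.mp hcmem with hmem | hmem
    · exact rep_digits _ c hmem
    · simp at hmem; subst hmem; exact hk2
  rw [List.foldl_append, rep_val]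
  simp only [List.foldl_cons, List.foldl_nil, step10]
  rw [hk3]
  congr 1
  have h1 : (a.toNat : Int) = a := Int.toNat_of_nonneg (by omega)
  have h2 : (k.toNat : Int) = k := Int.toNat_of_nonneg (by rcases hk with rfl|rfl|rfl <;> norm_num)
  push_cast
  rw [h1, h2]
  ring

lemma childA_eq (a k : Int) (ha : 1 ≤ a) (hk : k = 1 ∨ k = 2 ∨ k = 3) :
    childA a k = 10 * a + k := by
  rw [childA, ofChars_child a k ha hk]
  rfl

-- ---- queue invariant ----

def qlist (i : Nat) : List Int := (List.range' (i + 1) (2 * i + 3)).map fval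

lemma qlist_cons (i : Nat) :
    qlist i = fval (i + 1) :: (List.range' (i + 2) (2 * i + 2)).map fval := by
  rw [qlist, show 2 * i + 3 = (2 * i + 2) + 1 from rfl, List.range'_succ, List.map_cons]

lemma bodyA_step (i : Nat) (ans : List Int) (x : Int) :
    bodyA (qlist i, ans) x = (qlist (i + 1), ans ++ [fval (i + 1)]) := by
  rw [qlist_cons, bodyA]
  simp only [PySem.List.pop?_zero_cons, List.foldl_cons, List.foldl_nil]
  have hpos : 1 ≤ fval (i + 1) := fval_pos _ (by omega)
  rw [childA_eq _ 1 hpos (by norm_num), childA_eq _ 2 hpos (by norm_num),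
      childA_eq _ 3 hpos (by norm_num)]
  have h1 : 10 * fval (i + 1) + 1 = fval (3 * i + 4) := by
    rw [show 3 * i + 4 = 3 * (i + 1) + 1 from by omega, fval_child _ 1 (by omega) (by omega)]
    norm_num
  have h2 : 10 * fval (i + 1) + 2 = fval (3 * i + 5) := by
    rw [show 3 * i + 5 = 3 * (i + 1) + 2 from by omega, fval_child _ 2 (by omega) (by omega)]
    norm_num
  have h3 : 10 * fval (i + 1) + 3 = fval (3 * i + 6) := by
    rw [show 3 * i + 6 = 3 * (i + 1) + 3 from by omega, fval_child _ 3 (by omega) (by omega)]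
    norm_num
  rw [h1, h2, h3]
  have hq : (List.range' (i + 2) (2 * i + 2)).map fval ++ [fval (3 * i + 4)] ++ [fval (3 * i + 5)]
      ++ [fval (3 * i + 6)] = qlist (i + 1) := by
    rw [qlist]
    rw [show 2 * (i + 1) + 3 = (2 * i + 2) + 3 from by omega,
        ← List.range'_append_1 (s := i + 2) (m := 2 * i + 2) (n := 3)]
    have : List.range' (i + 2 + (2 * i + 2)) 3 = [3 * i + 4, 3 * i + 5, 3 * i + 6] := by
      simp [List.range']
      omega
    rw [this]
    simp [List.map_append]
  rw [hq]

lemma invA : ∀ (l : List Int) (i : Nat) (ans : List Int),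
    l.foldl bodyA (qlist i, ans) =
      (qlist (i + l.length), ans ++ (List.range' (i + 1) l.length).map fval) := by
  intro l
  induction l with
  | nil => intro i ans; simp
  | cons x l ih =>
    intro i ans
    rw [List.foldl_cons, bodyA_step, ih (i + 1) (ans ++ [fval (i + 1)])]
    rw [List.length_cons]
    have e1 : i + 1 + l.length = i + (l.length + 1) := by omega
    have e2 : List.range' (i + 1) (l.length + 1) = (i + 1) :: List.range' (i + 2) l.length :=
      List.range'_succ
    rw [e1, e2, List.map_cons, ← List.append_cons, ← List.singleton_append]

-- ===== VERDICT (by name: the statement is the Claim_ definition above) =====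
lemma qlist_zero : qlist 0 = ([1, 2, 3] : List Int) := by
  rw [qlist]
  decide

theorem solve_spec : Claim_equal_solve := by
  unfold Claim_equal_solve Spec_solve
  intro A _
  rw [solve, solve_alt, ← qlist_zero]
  rw [invA]
  simp only []
  rw [PySem.List.length_pyRange_one]
  rw [PySem.List.pyRange_one]
  rw [show ((A + 1 - 1).toNat) = (A - 0).toNat from by omega]
  rw [List.range'_eq_map_range]
  rw [List.map_map, List.map_map, List.nil_append]
  apply List.map_congr_left
  intro k _
  simp only [Function.comp]
  have h1 : ((1 : Int) + (k : Int)).toNat = 1 + k := by omega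
  show fval (1 + k) = valAuxB ((1 : Int) + (k : Int)).toNat ((1 : Int) + (k : Int)).toNat 0 1
  rw [h1]
  rfl
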